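-- pv_equiv track=rewrite | github.com/yoshua70/Diffie-Hellman | generatePythTripletMod.py | pythTripletMod
-- ===== SOURCE A (Python) =====
-- def pythTripletMod(p):
--   '''
--   Génère une liste de triplés pythagoriciens modulo p.
--   '''
--   C = []
--   compteur = 0
--
--   for a in range(1, int((p-1)/2 + 1)):
--     aa = a ** 2 % p
--     for b in range(1, int((p-1)/2 + 1)):
--       bb = b ** 2 % p
--       for c in range(1, int((p-1)/2 + 1)):
--         cc = c ** 2 % p
--         if (aa + bb) % p == cc and a<=b:
--           compteur = compteur + 1
--           C.append([a, b, c])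
--
--   return C
-- ===== SOURCE B (Python) =====
-- def pythTripletMod(p):
--   '''
--   Génère une liste de triplés pythagoriciens modulo p.
--   '''
--   n = int((p - 1) / 2 + 1)
--   # index every candidate c by its square residue (lists stay in increasing c order)
--   sq = {}
--   for c in range(1, n):
--     sq.setdefault(c * c % p, []).append(c)
--   triples = []
--   for a in range(1, n):
--     aa = a * a % p
--     for b in range(a, n):
--       r = (aa + b * b % p) % p
--       for c in sq.get(r, []):
--         triples.append([a, b, c])
--   return triples
-- ===== Notes on version B (the rewrite author's own statement) =====
-- stated objective: faster
-- what changed: Replaces the triple nested scan (with an a<=b filter inside the innermost loop) by a precomputed dict from square residue to the sorted list of its roots, so each (a,b) pair with b starting at a looks its matching c values up directly.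
import Mathlib
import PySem

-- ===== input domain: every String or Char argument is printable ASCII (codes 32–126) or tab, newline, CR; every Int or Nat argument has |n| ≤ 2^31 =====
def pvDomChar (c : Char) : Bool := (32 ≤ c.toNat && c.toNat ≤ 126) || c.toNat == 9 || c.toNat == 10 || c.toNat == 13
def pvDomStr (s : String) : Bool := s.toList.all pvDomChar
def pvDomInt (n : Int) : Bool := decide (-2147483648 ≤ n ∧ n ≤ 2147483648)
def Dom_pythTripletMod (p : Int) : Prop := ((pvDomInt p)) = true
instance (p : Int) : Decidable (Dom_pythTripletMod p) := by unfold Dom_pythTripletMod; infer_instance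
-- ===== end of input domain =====

-- B replaces A's triple nested scan by a dict from square residue to its (sorted) roots,
-- looked up once per (a,b) pair with b starting at a: asymptotically faster, same output.


-- ===== PORT A =====
-- int((p-1)/2 + 1): CPython float division is exact for |p| ≤ 2^31 and int() truncates
-- toward zero, so the bound is exactly (p+1) truncated-division 2 (Int.tdiv).
-- The unused local counter 'compteur' (dead state, never returned) is omitted.
def pythTripletMod (p : Int) : List (List Int) :=
  let n := Int.tdiv (p + 1) 2
  (PySem.List.pyRange 1 n 1).foldl (fun C a =>
    let aa := PySem.Int.mod (a ^ 2) p
    (PySem.List.pyRange 1 n 1).foldl (fun C b =>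
      let bb := PySem.Int.mod (b ^ 2) p
      (PySem.List.pyRange 1 n 1).foldl (fun C c =>
        let cc := PySem.Int.mod (c ^ 2) p
        if PySem.Int.mod (aa + bb) p = cc ∧ a ≤ b then C ++ [[a, b, c]] else C) C) C) []

-- ===== PORT B =====
-- sq.setdefault(k, []).append(c) is Dict.modify k [] (· ++ [c]) (insert at end if absent).
def pythTripletMod_alt (p : Int) : List (List Int) :=
  let n := Int.tdiv (p + 1) 2
  let sq := (PySem.List.pyRange 1 n 1).foldl
    (fun (d : PySem.Dict Int (List Int)) c =>
      d.modify (PySem.Int.mod (c * c) p) [] (· ++ [c])) PySem.Dict.empty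
  (PySem.List.pyRange 1 n 1).foldl (fun T a =>
    let aa := PySem.Int.mod (a * a) p
    (PySem.List.pyRange a n 1).foldl (fun T b =>
      let r := PySem.Int.mod (aa + PySem.Int.mod (b * b) p) p
      (sq.getD r []).foldl (fun T c => T ++ [[a, b, c]]) T) T) []

-- ===== PRECONDITION & SPEC =====
def Spec_pythTripletMod (p : Int) (out : List (List Int)) : Prop := out = pythTripletMod_alt p
instance (p : Int) (out : List (List Int)) : Decidable (Spec_pythTripletMod p out) := by unfold Spec_pythTripletMod; infer_instance

-- ===== CLAIM (what is proved, stated in full; the proofs are below) =====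
def Claim_equal_pythTripletMod : Prop := ∀ (p : Int), Dom_pythTripletMod p → Spec_pythTripletMod p (pythTripletMod p)

-- ===== LEMMAS AND PROOFS =====

-- the dict of square residues looks up exactly the filtered range
theorem pv_sq_getD (n p r : Int) :
    (((PySem.List.pyRange 1 n 1).foldl
      (fun (d : PySem.Dict Int (List Int)) c =>
        d.modify (PySem.Int.mod (c * c) p) [] (· ++ [c])) PySem.Dict.empty).getD r [])
    = (PySem.List.pyRange 1 n 1).filter (fun c => PySem.Int.mod (c * c) p == r) := by
  have h : ((PySem.List.pyRange 1 n 1).foldl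
      (fun (d : PySem.Dict Int (List Int)) c =>
        d.modify (PySem.Int.mod (c * c) p) [] (· ++ [c])) PySem.Dict.empty)
      = (((PySem.List.pyRange 1 n 1).map (fun c => (PySem.Int.mod (c * c) p, c))).foldl
          (fun d q => d.modify q.1 [] (· ++ [q.2])) PySem.Dict.empty) := by
    rw [List.foldl_map]
  rw [h, PySem.Dict.getD_foldl_modify_append]
  simp [List.filter_map, List.map_map, Function.comp_def]

-- for a fixed admissible a, A's full b-scan guarded by a ≤ b equals B's scan from a
theorem pv_perA (p n a : Int) (ℓ : List Int) (ha1 : 1 ≤ a) (ha2 : a ≤ n) :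
    (PySem.List.pyRange 1 n 1).flatMap (fun b =>
      (ℓ.filter (fun c =>
        decide (PySem.Int.mod (PySem.Int.mod (a ^ 2) p + PySem.Int.mod (b ^ 2) p) p
          = PySem.Int.mod (c ^ 2) p ∧ a ≤ b))).map (fun c => [a, b, c]))
    = (PySem.List.pyRange a n 1).flatMap (fun b =>
      (ℓ.filter (fun c => PySem.Int.mod (c * c) p
          == PySem.Int.mod (PySem.Int.mod (a * a) p + PySem.Int.mod (b * b) p) p)).map
        (fun c => [a, b, c])) := by
  rw [PySem.List.pyRange_one_append 1 a n ha1 ha2, List.flatMap_append]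
  have hlow : (PySem.List.pyRange 1 a 1).flatMap (fun b =>
      (ℓ.filter (fun c =>
        decide (PySem.Int.mod (PySem.Int.mod (a ^ 2) p + PySem.Int.mod (b ^ 2) p) p
          = PySem.Int.mod (c ^ 2) p ∧ a ≤ b))).map (fun c => [a, b, c])) = [] := by
    rw [List.flatMap_eq_nil_iff]
    intro b hb
    obtain ⟨_, hb2⟩ := (PySem.List.mem_pyRange_one).mp hb
    have hfalse : ∀ c, decide (PySem.Int.mod (PySem.Int.mod (a ^ 2) p + PySem.Int.mod (b ^ 2) p) p
        = PySem.Int.mod (c ^ 2) p ∧ a ≤ b) = false := by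
      intro c; simp; intro _; omega
    simp [hfalse]
  rw [hlow, List.nil_append]
  apply List.flatMap_congr
  intro b hb
  obtain ⟨hb1, _⟩ := (PySem.List.mem_pyRange_one).mp hb
  congr 1
  apply List.filter_congr
  intro c _
  simp only [pow_two]
  apply Bool.eq_iff_iff.mpr
  simp only [decide_eq_true_eq, beq_iff_eq]
  exact ⟨fun h => h.1.symm, fun h => ⟨h.symm, hb1⟩⟩

theorem pythTripletMod_eq (p : Int) :
    pythTripletMod p = pythTripletMod_alt p := by
  unfold pythTripletMod pythTripletMod_alt
  simp only [PySem.List.foldl_append_ite, PySem.List.foldl_append_singleton_eq_map]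
  simp only [PySem.List.foldl_append_eq_flatMap, pv_sq_getD, List.nil_append]
  apply List.flatMap_congr
  intro a ha
  obtain ⟨ha1, ha2⟩ := (PySem.List.mem_pyRange_one).mp ha
  exact pv_perA p _ a _ ha1 (le_of_lt ha2)

-- ===== VERDICT (by name: the statement is the Claim_ definition above) =====
theorem pythTripletMod_spec : Claim_equal_pythTripletMod := by
  intro p _
  unfold Spec_pythTripletMod
  exact pythTripletMod_eq p
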